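-- pv_equiv track=rewrite | github.com/MoWitek/YOLO | test3.py | fuze_slopes
-- ===== SOURCE A (Python) =====
-- def create_slope(sz, fill, back):
-- 	ar=[]
-- 	for n in range(sz):
-- 		a2 = []
-- 		a2.extend([fill for n in range(n + 1)])
-- 		a2.extend([back for n in range(sz - n - 1)])
-- 		ar.append(a2)
--
-- 	return ar
--
-- def fuze_slopes(s, fill=1, back=0):
-- 	rotate = lambda arr: [ list(x) for x in list(zip(*arr[::-1]))]
--
-- 	a1 = create_slope(s, fill, back)
-- 	a2 = rotate(create_slope(s, fill, back))
-- 	a3 = rotate(rotate(create_slope(s, fill, back)))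
-- 	a4 = rotate(rotate(rotate(create_slope(s, fill, back))))
--
-- 	arr = []
-- 	for a, b in zip(a4, a1):
-- 		arr.append([])
-- 		arr[-1].extend(a)
-- 		arr[-1].extend(b[1:])
-- 	for c, d in zip(a3[1:], a2[1:]):
-- 		arr.append([])
-- 		arr[-1].extend(c)
-- 		arr[-1].extend(d[1:])
--
-- 	return arr
-- ===== SOURCE B (Python) =====
-- def fuze_slopes(s, fill=1, back=0):
-- 	n = 2 * s - 1
-- 	c = s - 1
-- 	dj = [abs(j - c) for j in range(n)]
-- 	return [[fill if di + d <= c else back for d in dj] for di in dj]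
-- ===== Notes on version B (the rewrite author's own statement) =====
-- stated objective: simpler
-- what changed: Replaced the create_slope + triple-rotate + quadrant-stitch construction by a closed form: a precomputed list of distances to the centre and a per-cell Manhattan-distance test in a double comprehension.
import Mathlib
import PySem

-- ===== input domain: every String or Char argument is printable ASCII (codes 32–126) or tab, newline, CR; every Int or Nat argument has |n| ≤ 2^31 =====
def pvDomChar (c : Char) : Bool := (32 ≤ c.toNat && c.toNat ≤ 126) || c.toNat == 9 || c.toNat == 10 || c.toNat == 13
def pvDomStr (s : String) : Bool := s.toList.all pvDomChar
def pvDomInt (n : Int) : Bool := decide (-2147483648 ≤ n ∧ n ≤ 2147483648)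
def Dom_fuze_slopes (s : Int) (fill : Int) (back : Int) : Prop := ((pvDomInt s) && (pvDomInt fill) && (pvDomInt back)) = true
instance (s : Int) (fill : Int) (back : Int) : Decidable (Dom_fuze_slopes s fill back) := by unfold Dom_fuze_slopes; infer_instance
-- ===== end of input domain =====

-- B replaces A's create_slope + triple-rotate + quadrant-stitch construction by a single
-- closed-form per-cell Manhattan-distance test (objective: simpler).

-- ===== PORT A =====

-- 'create_slope(sz, fill, back)' of Source A, line for line.
def create_slope (sz : Int) (fill : Int) (back : Int) : List (List Int) :=
  (PySem.List.pyRange 0 sz 1).foldl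
    (fun ar n =>
      ar ++ [((PySem.List.pyRange 0 (n + 1) 1).map (fun _ => fill)) ++
             ((PySem.List.pyRange 0 (sz - n - 1) 1).map (fun _ => back))])
    []

-- zip(*rows): take heads while every row is nonempty (Python zip truncates at the
-- shortest row; the headD default is never read under the guard).
def pyZipStar (rows : List (List Int)) : List (List Int) :=
  if h : rows ≠ [] ∧ ∀ r ∈ rows, r ≠ [] then
    (rows.map (fun r => r.headD 0)) :: pyZipStar (rows.map List.tail)
  else []
termination_by (rows.headD []).length
decreasing_by
  obtain ⟨hne, hall⟩ := h
  cases rows with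
  | nil => exact absurd rfl hne
  | cons r rest =>
    have hr : r ≠ [] := hall r (by simp)
    cases r with
    | nil => exact absurd rfl hr
    | cons a l => simp [List.headD]

-- 'rotate = lambda arr: [list(x) for x in list(zip(*arr[::-1]))]' of Source A.
def pyRotate (arr : List (List Int)) : List (List Int) :=
  (pyZipStar arr.reverse).map (fun x => x)

def fuze_slopes (s : Int) (fill : Int) (back : Int) : List (List Int) :=
  let a1 := create_slope s fill back
  let a2 := pyRotate (create_slope s fill back)
  let a3 := pyRotate (pyRotate (create_slope s fill back))
  let a4 := pyRotate (pyRotate (pyRotate (create_slope s fill back)))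
  let arr := (a4.zip a1).foldl
    (fun arr ab => arr ++ [ab.1 ++ PySem.List.slice ab.2 (some 1) none]) []
  ((PySem.List.slice a3 (some 1) none).zip (PySem.List.slice a2 (some 1) none)).foldl
    (fun arr cd => arr ++ [cd.1 ++ PySem.List.slice cd.2 (some 1) none]) arr

-- ===== PORT B =====
def fuze_slopes_alt (s : Int) (fill : Int) (back : Int) : List (List Int) :=
  let n := 2 * s - 1
  let c := s - 1
  let dj := (PySem.List.pyRange 0 n 1).map (fun j => |j - c|)
  dj.map (fun di => dj.map (fun d => if di + d ≤ c then fill else back))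

-- ===== PRECONDITION & SPEC =====
def Spec_fuze_slopes (s : Int) (fill : Int) (back : Int) (out : List (List Int)) : Prop := out = fuze_slopes_alt s fill back
instance (s : Int) (fill : Int) (back : Int) (out : List (List Int)) : Decidable (Spec_fuze_slopes s fill back out) := by unfold Spec_fuze_slopes; infer_instance

-- ===== CLAIM (what is proved, stated in full; the proofs are below) =====
def Claim_equal_fuze_slopes : Prop := ∀ (s : Int) (fill : Int) (back : Int), Dom_fuze_slopes s fill back → Spec_fuze_slopes s fill back (fuze_slopes s fill back)

-- ===== LEMMAS AND PROOFS =====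

-- a t×t grid given by an entry function
def pvGrid (t : Nat) (e : Nat → Nat → Int) : List (List Int) :=
  (List.range t).map (fun i => (List.range t).map (e i))

theorem pvFoldl_append_singleton {α β : Type} (g : α → β) (l : List α) (init : List β) :
    l.foldl (fun acc x => acc ++ [g x]) init = init ++ l.map g := by
  induction l generalizing init with
  | nil => simp
  | cons a l ih => simp [List.foldl, ih]

theorem pvZipStar_eq (m : Nat) : ∀ rows : List (List Int), rows ≠ [] →
    (∀ r ∈ rows, r.length = m) →
    pyZipStar rows = (List.range m).map (fun j => rows.map (fun r => r.getD j 0)) := by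
  induction m with
  | zero =>
    intro rows hne hlen
    rw [pyZipStar]
    have : ¬ (rows ≠ [] ∧ ∀ r ∈ rows, r ≠ []) := by
      rintro ⟨h1, h2⟩
      cases rows with
      | nil => exact h1 rfl
      | cons r rest =>
        have := hlen r (by simp)
        have := h2 r (by simp)
        simp_all [List.length_eq_zero_iff]
    simp [this]
  | succ m ih =>
    intro rows hne hlen
    have hall : ∀ r ∈ rows, r ≠ [] := by
      intro r hr
      have := hlen r hr
      intro h; subst h; simp at this
    rw [pyZipStar]
    simp only [dif_pos (And.intro hne hall)]
    have h1 : (rows.map List.tail) ≠ [] := by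
      cases rows with
      | nil => exact absurd rfl hne
      | cons r rest => simp
    have h2 : ∀ r ∈ rows.map List.tail, r.length = m := by
      intro r hr
      rcases List.mem_map.mp hr with ⟨r0, hr0, rfl⟩
      have := hlen r0 hr0
      simp [List.length_tail, this]
    rw [ih _ h1 h2, List.range_succ_eq_map]
    simp only [List.map_cons, List.map_map]
    congr 1
    · apply List.map_congr_left
      intro r hr
      rcases List.exists_cons_of_ne_nil (hall r hr) with ⟨a, l, rfl⟩
      rfl
    · apply List.map_congr_left
      intro j _
      apply List.map_congr_left
      intro r hr
      rcases List.exists_cons_of_ne_nil (hall r hr) with ⟨a, l, rfl⟩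
      simp [List.getD]

theorem pvRotate_grid (t : Nat) (ht : 0 < t) (e : Nat → Nat → Int) :
    pyRotate (pvGrid t e) = pvGrid t (fun i j => e (t - 1 - j) i) := by
  unfold pyRotate
  have hne : (pvGrid t e).reverse ≠ [] := by
    simp [pvGrid, List.eq_nil_iff_length_eq_zero]
    omega
  have hlen : ∀ r ∈ (pvGrid t e).reverse, r.length = t := by
    intro r hr
    rw [List.mem_reverse] at hr
    rcases List.mem_map.mp hr with ⟨i, _, rfl⟩
    simp
  rw [pvZipStar_eq t _ hne hlen]
  simp only [List.map_id']
  unfold pvGrid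
  apply List.map_congr_left
  intro a ha
  rw [List.mem_range] at ha
  apply List.ext_getElem (by simp)
  intro b hb hb'
  have hbt : b < t := by simpa using hb'
  simp only [List.getElem_map, List.getElem_reverse, List.length_map, List.length_range,
    List.getElem_range]
  rw [List.getD_eq_getElem _ _ (by simp [ha])]
  simp

theorem pvRange_ite (t k : Nat) (hk : k < t) (f b : Int) :
    (List.range t).map (fun j => if j ≤ k then f else b)
      = List.replicate (k + 1) f ++ List.replicate (t - 1 - k) b := by
  have ht : t = (k + 1) + (t - 1 - k) := by omega
  conv_lhs => rw [ht]
  rw [List.range_add, List.map_append, List.map_map]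
  congr 1
  · apply List.eq_replicate_iff.mpr
    refine ⟨by simp, ?_⟩
    intro x hx
    rcases List.mem_map.mp hx with ⟨j, hj, rfl⟩
    rw [List.mem_range] at hj
    simp [Nat.lt_succ_iff.mp hj]
  · apply List.eq_replicate_iff.mpr
    refine ⟨by simp, ?_⟩
    intro x hx
    rcases List.mem_map.mp hx with ⟨j, hj, rfl⟩
    simp only [Function.comp]
    rw [if_neg (by omega)]

theorem pvCreate_slope_eq (s fill back : Int) (hs : 0 < s) :
    create_slope s fill back = pvGrid s.toNat (fun i j => if j ≤ i then fill else back) := by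
  unfold create_slope
  rw [pvFoldl_append_singleton]
  rw [PySem.List.pyRange_one]
  simp only [List.nil_append, Int.sub_zero, List.map_map]
  unfold pvGrid
  apply List.map_congr_left
  intro k hk
  rw [List.mem_range] at hk
  simp only [Function.comp, zero_add]
  rw [pvRange_ite s.toNat k hk]
  have h1 : ((PySem.List.pyRange 0 ((k : Int) + 1) 1).map (fun _ => fill))
      = List.replicate (k + 1) fill := by
    rw [PySem.List.pyRange_one]
    simp only [List.map_map]
    rw [show ((k : Int) + 1 - 0).toNat = k + 1 by omega]
    apply List.eq_replicate_iff.mpr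
    exact ⟨by simp, by intro x hx; rcases List.mem_map.mp hx with ⟨_, _, rfl⟩; rfl⟩
  have h2 : ((PySem.List.pyRange 0 (s - (k : Int) - 1) 1).map (fun _ => back))
      = List.replicate (s.toNat - 1 - k) back := by
    rw [PySem.List.pyRange_one]
    simp only [List.map_map]
    rw [show (s - (k : Int) - 1 - 0).toNat = s.toNat - 1 - k by omega]
    apply List.eq_replicate_iff.mpr
    exact ⟨by simp, by intro x hx; rcases List.mem_map.mp hx with ⟨_, _, rfl⟩; rfl⟩
  rw [h1, h2]

-- tail of a mapped range: ((range t).map g).tail = (range (t-1)).map (g ∘ succ)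
theorem pvTail_map_range {β : Type} (t : Nat) (ht : 0 < t) (g : Nat → β) :
    ((List.range t).map g).tail = (List.range (t - 1)).map (fun k => g (k + 1)) := by
  obtain ⟨t', rfl⟩ : ∃ t', t = t' + 1 := ⟨t - 1, by omega⟩
  rw [List.range_succ_eq_map]
  simp [List.map_map, Nat.succ_eq_add_one]

theorem fuze_slopes_spec_pos (s fill back : Int) (hs : 0 < s) :
    fuze_slopes s fill back = fuze_slopes_alt s fill back := by
  set t := s.toNat with hts
  have ht : 0 < t := by omega
  have hcs : create_slope s fill back = pvGrid t (fun i j => if j ≤ i then fill else back) :=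
    pvCreate_slope_eq s fill back hs
  unfold fuze_slopes
  simp only [hcs]
  rw [pvRotate_grid t ht, pvRotate_grid t ht, pvRotate_grid t ht]
  -- name the four entry functions
  set e0 : Nat → Nat → Int := fun i j => if j ≤ i then fill else back with he0
  set e1 : Nat → Nat → Int := fun i j => e0 (t - 1 - j) i with he1
  set e2 : Nat → Nat → Int := fun i j => e1 (t - 1 - j) i with he2
  set e3 : Nat → Nat → Int := fun i j => e2 (t - 1 - j) i with he3
  rw [pvFoldl_append_singleton, pvFoldl_append_singleton]
  simp only [List.nil_append]
  -- collapse the zips of equal-range maps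
  unfold pvGrid
  rw [PySem.List.slice_from_one, PySem.List.slice_from_one,
      pvTail_map_range t ht, pvTail_map_range t ht]
  rw [List.zip_map', List.zip_map', List.map_map, List.map_map]
  -- B side
  simp only [fuze_slopes_alt]
  rw [PySem.List.pyRange_one]
  simp only [List.map_map]
  have hn : ((2 * s - 1 : Int) - 0).toNat = t + (t - 1) := by omega
  rw [hn, List.range_add, List.map_append, List.map_map]
  congr 1
  · -- top t rows
    apply List.map_congr_left
    intro i hi
    rw [List.mem_range] at hi
    simp only [Function.comp_def]
    rw [PySem.List.slice_from_one, pvTail_map_range t ht]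
    rw [List.map_append, List.map_map]
    congr 1
    · apply List.map_congr_left
      intro j hj
      rw [List.mem_range] at hj
      simp only [he3, he2, he1, he0]
      rcases abs_cases ((0 : Int) + (i : Int) - (s - 1)) with ⟨ha, ha'⟩ | ⟨ha, ha'⟩ <;>
        rcases abs_cases ((0 : Int) + (j : Int) - (s - 1)) with ⟨hb, hb'⟩ | ⟨hb, hb'⟩ <;>
        exact if_congr (by omega) rfl rfl
    · apply List.map_congr_left
      intro k hk
      rw [List.mem_range] at hk
      simp only [Function.comp_def, he0]
      rcases abs_cases ((0 : Int) + (i : Int) - (s - 1)) with ⟨ha, ha'⟩ | ⟨ha, ha'⟩ <;>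
        rcases abs_cases ((0 : Int) + ((t + k : Nat) : Int) - (s - 1)) with ⟨hb, hb'⟩ | ⟨hb, hb'⟩ <;>
        exact if_congr (by omega) rfl rfl
  · -- bottom t-1 rows
    apply List.map_congr_left
    intro p hp
    rw [List.mem_range] at hp
    simp only [Function.comp_def]
    rw [PySem.List.slice_from_one, pvTail_map_range t ht]
    rw [List.map_append, List.map_map]
    congr 1
    · apply List.map_congr_left
      intro j hj
      rw [List.mem_range] at hj
      simp only [he2, he1, he0]
      rcases abs_cases ((0 : Int) + ((t + p : Nat) : Int) - (s - 1)) with ⟨ha, ha'⟩ | ⟨ha, ha'⟩ <;>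
        rcases abs_cases ((0 : Int) + (j : Int) - (s - 1)) with ⟨hb, hb'⟩ | ⟨hb, hb'⟩ <;>
        exact if_congr (by omega) rfl rfl
    · apply List.map_congr_left
      intro k hk
      rw [List.mem_range] at hk
      simp only [Function.comp_def, he1, he0]
      rcases abs_cases ((0 : Int) + ((t + p : Nat) : Int) - (s - 1)) with ⟨ha, ha'⟩ | ⟨ha, ha'⟩ <;>
        rcases abs_cases ((0 : Int) + ((t + k : Nat) : Int) - (s - 1)) with ⟨hb, hb'⟩ | ⟨hb, hb'⟩ <;>
        exact if_congr (by omega) rfl rfl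

theorem fuze_slopes_spec_nonpos (s fill back : Int) (hs : s ≤ 0) :
    fuze_slopes s fill back = fuze_slopes_alt s fill back := by
  have h1 : create_slope s fill back = [] := by
    unfold create_slope
    rw [PySem.List.pyRange_one_eq_nil hs]
    rfl
  have h2 : pyRotate [] = [] := by
    unfold pyRotate
    rw [pyZipStar]
    simp
  unfold fuze_slopes fuze_slopes_alt
  simp only [h1, h2]
  rw [PySem.List.pyRange_one_eq_nil (show (2 * s - 1 : Int) ≤ 0 by omega)]
  simp [PySem.List.slice]

-- ===== VERDICT (by name: the statement is the Claim_ definition above) =====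
theorem fuze_slopes_spec : Claim_equal_fuze_slopes := by
  intro s fill back _
  unfold Spec_fuze_slopes
  by_cases hs : s ≤ 0
  · exact fuze_slopes_spec_nonpos s fill back hs
  · exact fuze_slopes_spec_pos s fill back (by omega)
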